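-- pv_equiv track=rewrite | github.com/DTW-Thalion/MPEG-O | python/src/ttio/codecs/fqzcomp_nx16_z.py | normalise_to_total
-- ===== SOURCE A (Python) =====
-- T: int = 1 << 12            # 4096 — fixed total per block
--
-- def normalise_to_total(raw_count: list[int], total: int = T) -> list[int]:
--     """Normalise ``raw_count[256]`` to a freq[256] summing exactly to ``total``.
--
--     Standard "scale-and-fix" algorithm:
--       1. If sum is 0, set freq[0] = total (degenerate convention).
--       2. Otherwise scale each non-zero count proportionally with rounding,
--          floor at 1 (so any present symbol stays encodable).
--       3. Adjust by walking the largest entries up/down until sum == total.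
--
--     All deterministic integer math — no floats, no order ambiguity (we
--     pick the largest freq with the smallest symbol index for ties).
--     """
--     s = sum(raw_count)
--     freq = [0] * 256
--     if s == 0:
--         freq[0] = total
--         return freq
--
--     # Scaled rounding: freq[i] = max(1, round(c * total / s)) for c > 0.
--     fsum = 0
--     for i in range(256):
--         c = raw_count[i]
--         if c == 0:
--             continue
--         # Use integer rounding: (c * total + s // 2) // s.
--         scaled = (c * total + s // 2) // s
--         if scaled < 1:
--             scaled = 1
--         freq[i] = scaled
--         fsum += scaled
--
--     delta = total - fsum
--     if delta == 0:
--         return freq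
--
--     if delta > 0:
--         # Need to add `delta` total counts. Add 1-by-1 to the entries
--         # ordered by largest current freq, ascending sym tie-break, but
--         # only to symbols that already had count > 0 (preserve zero-ness).
--         order = sorted(
--             (i for i in range(256) if raw_count[i] > 0),
--             key=lambda i: (-freq[i], i),
--         )
--         if not order:
--             # Pathological: should not happen since s > 0 implies at least
--             # one nonzero. But guard anyway.
--             freq[0] = total
--             return freq
--         k = 0
--         n = len(order)
--         while delta > 0:
--             freq[order[k % n]] += 1
--             k += 1
--             delta -= 1
--         return freq
--
--     # delta < 0: need to remove (-delta) total counts. Walk largest entries,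
--     # decrementing but never below 1.
--     deficit = -delta
--     while deficit > 0:
--         # Find the largest freq among those still > 1, breaking ties by
--         # smallest sym (consistent with delta>0 path).
--         best_i = -1
--         best_v = -1
--         for i in range(256):
--             if freq[i] > 1 and freq[i] > best_v:
--                 best_v = freq[i]
--                 best_i = i
--         if best_i < 0:
--             # Cannot reduce further — every present freq is at the floor.
--             # This should be vanishingly rare since total >= number of
--             # distinct symbols. Bail with the current (over-target) sum;
--             # the caller has set total = T = 4096 which is far above 256.
--             raise ValueError(
--                 "normalise_to_total: cannot reduce below floor=1; "
--                 "raw_count has too many distinct symbols vs total"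
--             )
--         freq[best_i] -= 1
--         deficit -= 1
--     return freq
-- ===== SOURCE B (Python) =====
-- T: int = 1 << 12            # 4096 — fixed total per block
--
--
-- def _insert_sorted(items, pair):
--     """Insert pair into ascending-sorted items (in place)."""
--     j = 0
--     while j < len(items) and items[j] < pair:
--         j += 1
--     items.insert(j, pair)
--
--
-- def normalise_to_total(raw_count: list[int], total: int = T) -> list[int]:
--     """Same result as the scan-and-fix original, but the surplus (delta > 0)
--     is distributed in one closed-form pass over the sorted order, and the
--     deficit (delta < 0) walks a sorted priority list of (-freq, i) instead of
--     rescanning all 256 entries for each removed unit."""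
--     s = sum(raw_count)
--     freq = [0] * 256
--     if s == 0:
--         freq[0] = total
--         return freq
--
--     fsum = 0
--     for i in range(256):
--         c = raw_count[i]
--         if c == 0:
--             continue
--         scaled = (c * total + s // 2) // s
--         if scaled < 1:
--             scaled = 1
--         freq[i] = scaled
--         fsum += scaled
--
--     delta = total - fsum
--     if delta == 0:
--         return freq
--
--     if delta > 0:
--         order = sorted(
--             (i for i in range(256) if raw_count[i] > 0),
--             key=lambda i: (-freq[i], i),
--         )
--         if not order:
--             freq[0] = total
--             return freq
--         n = len(order)
--         q, r = divmod(delta, n)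
--         # round-robin over `order` in closed form: first r entries get q+1
--         for j, i in enumerate(order):
--             freq[i] += q + (1 if j < r else 0)
--         return freq
--
--     # delta < 0: sorted priority list of (-freq[i], i); the head is always the
--     # largest freq with the smallest index.
--     items = sorted((-freq[i], i) for i in range(256) if freq[i] > 1)
--     deficit = -delta
--     while deficit > 0:
--         if not items:
--             raise ValueError(
--                 "normalise_to_total: cannot reduce below floor=1; "
--                 "raw_count has too many distinct symbols vs total"
--             )
--         negv, i = items.pop(0)
--         freq[i] = -negv - 1
--         if freq[i] > 1:
--             _insert_sorted(items, (-freq[i], i))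
--         deficit -= 1
--     return freq
-- ===== Notes on version B (the rewrite author's own statement) =====
-- stated objective: alternative
-- what changed: Phase 1 (scale-and-floor) is kept; the surplus (delta>0) round-robin while-loop is replaced by a closed-form distribution (each of the n ordered symbols gets delta//n, the first delta%n get one extra), and the deficit (delta<0) loop's full 256-entry argmax rescan per removed unit is replaced by a sorted priority list of (-freq, i) pairs popped from the front with ordered reinsertion.
import Mathlib
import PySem

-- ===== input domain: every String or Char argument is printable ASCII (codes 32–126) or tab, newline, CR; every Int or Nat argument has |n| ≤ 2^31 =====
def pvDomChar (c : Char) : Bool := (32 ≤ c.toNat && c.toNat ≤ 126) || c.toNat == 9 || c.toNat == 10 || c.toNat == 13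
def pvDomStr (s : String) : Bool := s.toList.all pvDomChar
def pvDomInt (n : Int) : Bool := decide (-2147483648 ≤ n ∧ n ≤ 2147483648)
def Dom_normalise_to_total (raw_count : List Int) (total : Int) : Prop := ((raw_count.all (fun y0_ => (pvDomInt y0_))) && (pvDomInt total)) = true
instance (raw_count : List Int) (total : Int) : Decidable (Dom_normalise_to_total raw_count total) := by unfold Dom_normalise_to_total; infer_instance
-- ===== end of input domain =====

-- B replaces A's per-unit surplus round-robin by a closed-form distribution and A's
-- per-unit 256-entry rescans (deficit path) by a sorted priority list of (-freq, i);
-- objective: alternative structure, same results.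

-- ===== PORT A =====

-- shared by both ports because the Python sources share these lines verbatim:
-- phase 1 (scaled rounding with floor 1) and the sorted `order` of positive symbols.
def ntPhase1 (raw_count : List Int) (total s : Int) : List Int × Int :=
  (PySem.List.pyRange 0 256 1).foldl
    (fun st i =>
      let c := PySem.List.pyGetD raw_count i 0    -- raw_count[i]; in range under Pre_
      if c = 0 then st
      else
        let scaled0 := PySem.Int.floordiv (c * total + PySem.Int.floordiv s 2) s
        let scaled := if scaled0 < 1 then 1 else scaled0
        (PySem.List.pySetD st.1 i scaled, st.2 + scaled))
    (List.replicate 256 0, 0)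

def ntOrder (raw_count freq : List Int) : List Int :=
  PySem.List.sorted2
    ((PySem.List.pyRange 0 256 1).filter (fun i => decide (0 < PySem.List.pyGetD raw_count i 0)))
    (fun i => -(PySem.List.pyGetD freq i 0)) (fun i => i)

-- the inner 256-entry scan for the largest freq > 1 (smallest index wins ties)
def ntBestScan (freq : List Int) : Int × Int :=
  (PySem.List.pyRange 0 256 1).foldl
    (fun st i =>
      let f := PySem.List.pyGetD freq i 0
      if 1 < f ∧ st.2 < f then (i, f) else st)
    (-1, -1)

-- `while delta > 0` round-robin loop, fuel = delta.toNat (delta > 0 at the call)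
def ntAddLoopA (order : List Int) (n : Nat) (freq : List Int) (k : Nat) : Nat → List Int
  | 0 => freq
  | fuel+1 =>
    let i := order.getD (k % n) 0
    ntAddLoopA order n (PySem.List.pySetD freq i (PySem.List.pyGetD freq i 0 + 1)) (k+1) fuel

-- `while deficit > 0` loop, fuel = (-delta).toNat; the `best_i < 0` branch is
-- Python's `raise ValueError` (excluded by Pre_): the port returns freq there.
def ntSubLoopA (freq : List Int) : Nat → List Int
  | 0 => freq
  | fuel+1 =>
    let b := ntBestScan freq
    if b.1 < 0 then freq
    else ntSubLoopA (PySem.List.pySetD freq b.1 (PySem.List.pyGetD freq b.1 0 - 1)) fuel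

def normalise_to_total (raw_count : List Int) (total : Int) : List Int :=
  let s := raw_count.sum
  if s = 0 then PySem.List.pySetD (List.replicate 256 0) 0 total
  else
    let p := ntPhase1 raw_count total s
    let freq := p.1
    let delta := total - p.2
    if delta = 0 then freq
    else if 0 < delta then
      let order := ntOrder raw_count freq
      if order = [] then PySem.List.pySetD freq 0 total
      else ntAddLoopA order order.length freq 0 delta.toNat
    else ntSubLoopA freq (-delta).toNat

-- ===== PORT B =====

-- port of _insert_sorted: skip the items that compare `<` the pair (tuple `<`
-- on int pairs is the lexicographic order, written out), insert before the rest
def ntInsSorted (items : List (Int × Int)) (pair : Int × Int) : List (Int × Int) :=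
  match items with
  | [] => [pair]
  | p :: rest =>
    if p.1 < pair.1 ∨ (p.1 = pair.1 ∧ p.2 < pair.2) then p :: ntInsSorted rest pair
    else pair :: p :: rest

-- items = sorted((-freq[i], i) for i in range(256) if freq[i] > 1)
def ntItems0 (freq : List Int) : List (Int × Int) :=
  PySem.List.sorted2
    ((PySem.List.pyRange 0 256 1).filterMap (fun i =>
      if 1 < PySem.List.pyGetD freq i 0 then some (-(PySem.List.pyGetD freq i 0), i) else none))
    (fun p => p.1) (fun p => p.2)

-- `while deficit > 0` over the sorted priority list, fuel = (-delta).toNat;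
-- the `not items` branch is Python's `raise ValueError` (excluded by Pre_).
def ntSubLoopB : List Int → List (Int × Int) → Nat → List Int
  | freq, _, 0 => freq
  | freq, [], _+1 => freq
  | freq, (negv, i) :: rest, fuel+1 =>
    let f := -negv - 1
    let freq' := PySem.List.pySetD freq i f
    let items' := if 1 < f then ntInsSorted rest (-f, i) else rest
    ntSubLoopB freq' items' fuel

def normalise_to_total_alt (raw_count : List Int) (total : Int) : List Int :=
  let s := raw_count.sum
  if s = 0 then PySem.List.pySetD (List.replicate 256 0) 0 total
  else
    let p := ntPhase1 raw_count total s
    let freq := p.1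
    let delta := total - p.2
    if delta = 0 then freq
    else if 0 < delta then
      let order := ntOrder raw_count freq
      if order = [] then PySem.List.pySetD freq 0 total
      else
        let n := order.length
        let q := PySem.Int.floordiv delta (n : Int)
        let r := PySem.Int.mod delta (n : Int)
        (PySem.List.enumerate order).foldl
          (fun fr ji =>
            PySem.List.pySetD fr ji.2
              (PySem.List.pyGetD fr ji.2 0 + (q + (if ji.1 < r then 1 else 0))))
          freq
    else ntSubLoopB freq (ntItems0 freq) (-delta).toNat

-- ===== PRECONDITION & SPEC =====
-- Pre_ = exactly the inputs where the Python A returns: it raises IndexError when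
-- sum ≠ 0 and len(raw_count) < 256, and ValueError when the deficit walk hits the
-- floor, which happens exactly when the number of nonzero counts exceeds `total`.
def Pre_normalise_to_total (raw_count : List Int) (total : Int) : Prop :=
  raw_count.sum = 0 ∨
    (256 ≤ raw_count.length ∧
      (((List.range 256).countP (fun k => decide (raw_count.getD k 0 ≠ 0)) : Int) ≤ total))
instance (raw_count : List Int) (total : Int) : Decidable (Pre_normalise_to_total raw_count total) := by
  unfold Pre_normalise_to_total; infer_instance

def pvWitness_normalise_to_total : List Int × Int := ([], 4096)

def Spec_normalise_to_total (raw_count : List Int) (total : Int) (out : List Int) : Prop := out = normalise_to_total_alt raw_count total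
instance (raw_count : List Int) (total : Int) (out : List Int) : Decidable (Spec_normalise_to_total raw_count total out) := by unfold Spec_normalise_to_total; infer_instance

-- ===== CLAIM (what is proved, stated in full; the proofs are below) =====
def Claim_equal_normalise_to_total : Prop := ∀ (raw_count : List Int) (total : Int), Dom_normalise_to_total raw_count total → Pre_normalise_to_total raw_count total → Spec_normalise_to_total raw_count total (normalise_to_total raw_count total)

-- ===== LEMMAS AND PROOFS =====

-- strict lexicographic order on int pairs (Python's tuple `<`)
def lexLT (a b : Int × Int) : Prop := a.1 < b.1 ∨ (a.1 = b.1 ∧ a.2 < b.2)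
def lexLE (a b : Int × Int) : Prop := ¬ lexLT b a

theorem lex_trichot (a b : Int × Int) : lexLT a b ∨ a = b ∨ lexLT b a := by
  rcases a with ⟨a1, a2⟩; rcases b with ⟨b1, b2⟩
  simp only [lexLT, Prod.mk.injEq]
  omega
theorem lex_asymm {a b : Int × Int} (h : lexLT a b) : ¬ lexLT b a := by
  rcases a with ⟨a1, a2⟩; rcases b with ⟨b1, b2⟩
  simp only [lexLT] at *; omega
theorem lex_trans {a b c : Int × Int} (h1 : lexLT a b) (h2 : lexLT b c) : lexLT a c := by
  rcases a with ⟨a1, a2⟩; rcases b with ⟨b1, b2⟩; rcases c with ⟨c1, c2⟩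
  simp only [lexLT] at *; omega

theorem getD_set_ne (l : List Int) (k m : Nat) (v : Int) (h : m ≠ k) :
    (l.set k v).getD m 0 = l.getD m 0 := by
  simp [List.getD_eq_getElem?_getD, List.getElem?_set_ne (Ne.symm h)]

theorem getD_set_self (l : List Int) (k : Nat) (v : Int) (h : k < l.length) :
    (l.set k v).getD k 0 = v := by
  simp [List.getD_eq_getElem?_getD, List.getElem?_set_self h]

theorem count_mod (n p : Nat) (hn : 0 < n) (hp : p < n) :
    ∀ d, (List.range d).countP (fun t => t % n == p) = d / n + (if p < d % n then 1 else 0)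
  | 0 => by simp
  | d + 1 => by
    rw [List.range_succ, List.countP_append, count_mod n p hn hp d]
    simp only [List.countP_singleton, beq_iff_eq]
    rcases Nat.lt_or_ge 1 n with h1n | h1n
    · have hmod : (d + 1) % n = (d % n + 1) % n := by
        rw [Nat.add_mod, Nat.mod_eq_of_lt h1n]
      have hdm : d % n < n := Nat.mod_lt _ hn
      by_cases he : d % n + 1 = n
      · -- d % n + 1 = n : wraps
        have hz : (d + 1) % n = 0 := by rw [hmod, he, Nat.mod_self]
        have hdvd : n ∣ d + 1 := (Nat.dvd_of_mod_eq_zero hz)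
        rw [Nat.succ_div, if_pos hdvd, hz]
        split_ifs <;> omega
      · have hlt : d % n + 1 < n := by omega
        have hz : (d + 1) % n = d % n + 1 := by rw [hmod, Nat.mod_eq_of_lt hlt]
        have hnd : ¬ n ∣ d + 1 := by
          intro hd; have := Nat.mod_eq_zero_of_dvd hd; omega
        rw [Nat.succ_div, if_neg hnd, hz]
        split_ifs <;> omega
    · -- n = 1
      have : n = 1 := by omega
      subst this
      simp [Nat.mod_one] at *
      omega

-- the multiset of (-freq[k], k) for k < m with freq[k] > 1, in index order
def ntL (fr : List Int) (ks : List Nat) : List (Int × Int) :=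
  ks.filterMap (fun k => if 1 < fr.getD k 0 then some (-(fr.getD k 0), (k : Int)) else none)


theorem order_mem (rc fr : List Int) : ∀ i ∈ ntOrder rc fr, 0 ≤ i ∧ i < 256 := by
  intro i hi
  have h1 := (PySem.List.sorted2_perm
    ((PySem.List.pyRange 0 256 1).filter (fun i => decide (0 < PySem.List.pyGetD rc i 0)))
    (fun i => -(PySem.List.pyGetD fr i 0)) (fun i => i) false).mem_iff.mp hi
  have h2 := List.mem_of_mem_filter h1
  exact PySem.List.mem_pyRange_one.mp h2

theorem order_nodup (rc fr : List Int) : (ntOrder rc fr).Nodup := by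
  have h1 := PySem.List.sorted2_perm
    ((PySem.List.pyRange 0 256 1).filter (fun i => decide (0 < PySem.List.pyGetD rc i 0)))
    (fun i => -(PySem.List.pyGetD fr i 0)) (fun i => i) false
  exact h1.nodup_iff.mpr (List.Nodup.filter _ (PySem.List.nodup_pyRange_one 0 256))

theorem ext256 (l1 l2 : List Int) (h1 : l1.length = 256) (h2 : l2.length = 256)
    (h : ∀ j : Nat, j < 256 → l1.getD j 0 = l2.getD j 0) : l1 = l2 := by
  refine List.ext_getElem (by omega) (fun i hi hi2 => ?_)
  have := h i (by omega)
  rwa [List.getD_eq_getElem _ _ hi, List.getD_eq_getElem _ _ hi2] at this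

theorem setD_getD (fr : List Int) (i : Int) (v : Int) (hge : 0 ≤ i) (hlt : i < 256)
    (hlen : fr.length = 256) (j : Nat) :
    (PySem.List.pySetD fr i v).getD j 0 = if i = (j : Int) then v else fr.getD j 0 := by
  have hi : i = ((i.toNat : Nat) : Int) := (Int.toNat_of_nonneg hge).symm
  rw [hi, PySem.List.pySetD_natCast]
  by_cases h : i.toNat = j
  · subst h
    rw [getD_set_self _ _ _ (by omega), if_pos rfl]
  · rw [getD_set_ne fr i.toNat j v (Ne.symm h), if_neg (by exact_mod_cast h)]

theorem addA_len (order : List Int) (n : Nat) :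
    ∀ (fuel k : Nat) (fr : List Int), (ntAddLoopA order n fr k fuel).length = fr.length
  | 0, k, fr => rfl
  | fuel+1, k, fr => by
    rw [ntAddLoopA, addA_len order n fuel (k+1) _, PySem.List.length_pySetD]

theorem addA_getD (order : List Int) (n : Nat) (hn : n = order.length) (hpos : 0 < n)
    (hmem : ∀ i ∈ order, 0 ≤ i ∧ i < 256) :
    ∀ (fuel k : Nat) (fr : List Int), fr.length = 256 → ∀ (j : Nat),
      (ntAddLoopA order n fr k fuel).getD j 0
        = fr.getD j 0 + ((List.range fuel).countP (fun t => order.getD ((k+t) % n) 0 == ((j : Nat) : Int)) : Int)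
  | 0, k, fr, hlen, j => by simp [ntAddLoopA]
  | fuel+1, k, fr, hlen, j => by
    have hkn : k % n < n := Nat.mod_lt _ hpos
    have hmemi : order.getD (k % n) 0 ∈ order := by
      rw [List.getD_eq_getElem _ _ (by omega : k % n < order.length)]
      exact List.getElem_mem _
    obtain ⟨hge, hlt⟩ := hmem _ hmemi
    rw [ntAddLoopA]
    rw [addA_getD order n hn hpos hmem fuel (k+1) _ (by rw [PySem.List.length_pySetD, hlen]) j]
    rw [setD_getD fr _ _ hge hlt hlen j]
    have hcnt : (List.range (fuel+1)).countP (fun t => order.getD ((k+t) % n) 0 == ((j : Nat) : Int))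
        = (List.range fuel).countP (fun t => order.getD ((k+1+t) % n) 0 == ((j : Nat) : Int))
          + (if order.getD (k % n) 0 = ((j : Nat) : Int) then 1 else 0) := by
      rw [List.range_succ_eq_map, List.countP_cons, List.countP_map]
      have : (List.range fuel).countP ((fun t => order.getD ((k+t) % n) 0 == ((j : Nat) : Int)) ∘ Nat.succ)
          = (List.range fuel).countP (fun t => order.getD ((k+1+t) % n) 0 == ((j : Nat) : Int)) := by
        refine List.countP_congr (fun t _ => ?_)
        simp only [Function.comp]
        have : k + Nat.succ t = k + 1 + t := by omega
        rw [this]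
      rw [this]
      simp only [Nat.add_zero, beq_iff_eq]
    rw [hcnt]
    by_cases hij : order.getD (k % n) 0 = ((j : Nat) : Int)
    · simp only [hij, PySem.List.pyGetD_natCast]
      push_cast; omega
    · simp only [if_neg hij]
      push_cast; omega


theorem enum_cons (x : Int) (t : List Int) (s : Int) :
    PySem.List.enumerate (x :: t) s = (s, x) :: PySem.List.enumerate t (s+1) := rfl

theorem enum_append (u v : List Int) : ∀ s : Int,
    PySem.List.enumerate (u ++ v) s
      = PySem.List.enumerate u s ++ PySem.List.enumerate v (s + (u.length : Int)) := by
  induction u with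
  | nil => intro s; simp [PySem.List.enumerate]
  | cons x t ih =>
    intro s
    rw [List.cons_append, enum_cons, enum_cons, ih (s+1), List.cons_append]
    have h : (s+1) + (t.length : Int) = s + ((x :: t).length : Int) := by simp only [List.length_cons]; push_cast; ring
    rw [h]

theorem enum_snd_mem (l : List Int) : ∀ (s : Int) (p : Int × Int), p ∈ PySem.List.enumerate l s → p.2 ∈ l := by
  induction l with
  | nil => intro s p h; simp [PySem.List.enumerate] at h
  | cons x t ih =>
    intro s p h
    rw [enum_cons] at h
    rcases List.mem_cons.mp h with h | h
    · subst h; simp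
    · exact List.mem_cons_of_mem _ (ih (s+1) p h)

-- the delta > 0 distribution fold of port B, abstracted over the enumerated list
def ntAddB (q r : Int) (el : List (Int × Int)) (fr : List Int) : List Int :=
  el.foldl (fun fr ji =>
    PySem.List.pySetD fr ji.2 (PySem.List.pyGetD fr ji.2 0 + (q + (if ji.1 < r then 1 else 0)))) fr

theorem addB_len (q r : Int) : ∀ (el : List (Int × Int)) (fr : List Int),
    (ntAddB q r el fr).length = fr.length
  | [], fr => rfl
  | ji :: el, fr => by
    rw [ntAddB, List.foldl_cons, ← ntAddB, addB_len q r el _, PySem.List.length_pySetD]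

theorem addB_untouched (q r : Int) (j : Nat) : ∀ (el : List (Int × Int)) (fr : List Int),
    fr.length = 256 → (∀ p ∈ el, (0 ≤ p.2 ∧ p.2 < 256) ∧ p.2 ≠ ((j:Nat):Int)) →
    (ntAddB q r el fr).getD j 0 = fr.getD j 0
  | [], fr, _, _ => rfl
  | ji :: el, fr, hlen, hp => by
    obtain ⟨⟨hge, hlt⟩, hne⟩ := hp ji (List.mem_cons_self ..)
    rw [ntAddB, List.foldl_cons, ← ntAddB,
      addB_untouched q r j el _ (by rw [PySem.List.length_pySetD, hlen]) (fun p hp' => hp p (List.mem_cons_of_mem _ hp')),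
      setD_getD fr _ _ hge hlt hlen j, if_neg hne]

theorem addB_hit (q r : Int) (j : Nat) (hj : j < 256) (u w : List Int)
    (hu : ∀ i ∈ u, 0 ≤ i ∧ i < 256) (hw : ∀ i ∈ w, 0 ≤ i ∧ i < 256)
    (hju : ((j:Nat):Int) ∉ u) (hjw : ((j:Nat):Int) ∉ w)
    (fr : List Int) (hlen : fr.length = 256) :
    (ntAddB q r (PySem.List.enumerate (u ++ ((j:Nat):Int) :: w) 0) fr).getD j 0
      = fr.getD j 0 + (q + (if ((u.length : Nat) : Int) < r then 1 else 0)) := by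
  rw [enum_append, enum_cons, ntAddB, List.foldl_append, List.foldl_cons]
  rw [← ntAddB, ← ntAddB]
  dsimp only
  have hlen1 : (ntAddB q r (PySem.List.enumerate u 0) fr).length = 256 := by
    rw [addB_len, hlen]
  set fr1 := ntAddB q r (PySem.List.enumerate u 0) fr with hfr1
  have h1 : fr1.getD j 0 = fr.getD j 0 := by
    refine addB_untouched q r j _ fr hlen (fun p hp => ?_)
    have hm := enum_snd_mem u 0 p hp
    exact ⟨hu _ hm, fun he => hju (he ▸ hm)⟩
  rw [addB_untouched q r j _ _ (by rw [PySem.List.length_pySetD, hlen1]) (fun p hp => ?mem)]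
  case mem =>
    have hm := enum_snd_mem w _ p hp
    exact ⟨hw _ hm, fun he => hjw (he ▸ hm)⟩
  rw [setD_getD fr1 _ _ (by positivity) (by exact_mod_cast hj) hlen1 j, if_pos rfl,
    PySem.List.pyGetD_natCast, h1]
  norm_num


theorem addpos_eq (order : List Int) (hmem : ∀ i ∈ order, 0 ≤ i ∧ i < 256) (hnd : order.Nodup)
    (hne : order ≠ []) (delta : Int) (hd : 0 < delta) (fr : List Int) (hlen : fr.length = 256) :
    ntAddLoopA order order.length fr 0 delta.toNat
      = ntAddB (PySem.Int.floordiv delta (order.length : Int))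
          (PySem.Int.mod delta (order.length : Int)) (PySem.List.enumerate order 0) fr := by
  have hpos : 0 < order.length := List.length_pos_of_ne_nil hne
  have hdel : delta = ((delta.toNat : Nat) : Int) := (Int.toNat_of_nonneg hd.le).symm
  set n := order.length with hn
  set d := delta.toNat with hdd
  apply ext256 _ _ (by rw [addA_len, hlen]) (by rw [addB_len, hlen])
  intro j hj
  rw [addA_getD order n hn hpos hmem d 0 fr hlen j]
  by_cases hin : ((j : Nat) : Int) ∈ order
  · obtain ⟨u, w, horder⟩ := List.append_of_mem hin
    have hsplit : ∀ i ∈ u, 0 ≤ i ∧ i < 256 := fun i hi => hmem i (by rw [horder]; simp [hi])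
    have hsplitw : ∀ i ∈ w, 0 ≤ i ∧ i < 256 := fun i hi => hmem i (by rw [horder]; simp [hi])
    have hnd' := hnd
    rw [horder] at hnd'
    obtain ⟨-, hw2, hdis⟩ := List.nodup_append.mp hnd'
    have hju : ((j : Nat) : Int) ∉ u := fun hc => hdis _ hc _ List.mem_cons_self rfl
    have hjw : ((j : Nat) : Int) ∉ w := (List.nodup_cons.mp hw2).1
    have hun : u.length < n := by rw [hn, horder]; simp
    have hgetp : order[u.length]'(by omega) = ((j : Nat) : Int) := by
      simp only [horder]
      rw [List.getElem_append_right (le_refl _)]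
      simp
    have hcnt : (List.range d).countP (fun t => order.getD ((0 + t) % n) 0 == ((j : Nat) : Int))
        = (List.range d).countP (fun t => t % n == u.length) := by
      refine List.countP_congr (fun t _ => ?_)
      have h2 : t % n < n := Nat.mod_lt _ hpos
      have h0 : (0 + t) % n = t % n := by rw [Nat.zero_add]
      simp only [h0, beq_iff_eq]
      rw [List.getD_eq_getElem _ _ (by omega : t % n < order.length), ← hgetp]
      rw [hnd.getElem_inj_iff]
    rw [hcnt, count_mod n u.length hpos hun d]
    conv_rhs => rw [horder]
    rw [addB_hit _ _ j hj u w hsplit hsplitw hju hjw fr hlen]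
    rw [hdel]
    rw [PySem.Int.floordiv_natCast d n, PySem.Int.mod_natCast d n]
    by_cases hcond : u.length < d % n
    · rw [if_pos hcond, if_pos (by exact_mod_cast hcond)]
      push_cast; ring
    · rw [if_neg hcond, if_neg (by exact_mod_cast hcond)]
      push_cast; ring
  · have hcnt : (List.range d).countP (fun t => order.getD ((0 + t) % n) 0 == ((j : Nat) : Int)) = 0 := by
      rw [List.countP_eq_zero]
      intro t _
      have h2 : t % n < n := Nat.mod_lt _ hpos
      have h0 : (0 + t) % n = t % n := by rw [Nat.zero_add]
      simp only [h0, beq_iff_eq]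
      intro hc
      apply hin
      rw [← hc, List.getD_eq_getElem _ _ (by omega : t % n < order.length)]
      exact List.getElem_mem _
    rw [hcnt, addB_untouched _ _ j _ fr hlen (fun p hp => ?_)]
    · simp
    · have hm := enum_snd_mem order 0 p hp
      exact ⟨hmem _ hm, fun he => hin (he ▸ hm)⟩

theorem phase1_len (raw_count : List Int) (total s : Int) :
    (ntPhase1 raw_count total s).1.length = 256 := by
  unfold ntPhase1
  have H : ∀ (l : List Int) (st : List Int × Int), st.1.length = 256 →
      ((l.foldl (fun st i =>
        let c := PySem.List.pyGetD raw_count i 0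
        if c = 0 then st
        else
          let scaled0 := PySem.Int.floordiv (c * total + PySem.Int.floordiv s 2) s
          let scaled := if scaled0 < 1 then 1 else scaled0
          (PySem.List.pySetD st.1 i scaled, st.2 + scaled)) st).1.length = 256) := by
    intro l
    induction l with
    | nil => intro st h; exact h
    | cons x t ih =>
      intro st h
      rw [List.foldl_cons]
      apply ih
      dsimp only
      split
      · exact h
      · rw [PySem.List.length_pySetD]; exact h
  exact H _ _ (by rw [List.length_replicate])


-- ======== the deficit (delta < 0) path ========

-- the boolean comparison sorted2/insertBy use for our pair sort is exactly lexLT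
def bLT (a b : Int × Int) : Bool :=
  decide (a.1 < b.1) || (!decide (b.1 < a.1) && decide (a.2 < b.2))

theorem bLT_iff (a b : Int × Int) : bLT a b = true ↔ lexLT a b := by
  simp only [bLT, lexLT, Bool.or_eq_true, Bool.and_eq_true, Bool.not_eq_true',
    decide_eq_true_eq, decide_eq_false_iff_not]
  omega

theorem insertBy_perm (x : Int × Int) : ∀ l : List (Int × Int),
    (PySem.List.insertBy bLT x l).Perm (x :: l)
  | [] => List.Perm.refl _
  | y :: ys => by
    rw [PySem.List.insertBy]
    split
    · exact List.Perm.refl _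
    · exact ((insertBy_perm x ys).cons y).trans (List.Perm.swap _ _ _)

theorem mem_insertBy' {z x : Int × Int} {l : List (Int × Int)}
    (h : z ∈ PySem.List.insertBy bLT x l) : z = x ∨ z ∈ l := by
  have := (insertBy_perm x l).mem_iff.mp h
  simpa using this

theorem insertBy_pairwise (x : Int × Int) : ∀ l : List (Int × Int),
    l.Pairwise lexLE → (PySem.List.insertBy bLT x l).Pairwise lexLE
  | [], _ => by simp [PySem.List.insertBy]
  | y :: ys, hl => by
    obtain ⟨hy, hys⟩ := List.pairwise_cons.mp hl
    rw [PySem.List.insertBy]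
    split
    · rename_i hxy
      have hxy' : lexLT x y := (bLT_iff x y).mp hxy
      refine List.pairwise_cons.mpr ⟨?_, List.pairwise_cons.mpr ⟨hy, hys⟩⟩
      intro z hz
      rcases List.mem_cons.mp hz with rfl | hz
      · exact lex_asymm hxy'
      · intro hc; exact (hy z hz) (lex_trans hc hxy')
    · rename_i hxy
      have hxy' : ¬ lexLT x y := fun h => hxy ((bLT_iff x y).mpr h)
      refine List.pairwise_cons.mpr ⟨?_, insertBy_pairwise x ys hys⟩
      intro z hz
      rcases mem_insertBy' hz with rfl | hz
      · exact hxy'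
      · exact hy z hz

theorem sorted2_pairs_eq (xs : List (Int × Int)) :
    PySem.List.sorted2 xs (fun p => p.1) (fun p => p.2) false
      = xs.foldl (fun acc x => PySem.List.insertBy bLT x acc) [] := rfl

theorem sorted2_pairs_pairwise (xs : List (Int × Int)) :
    (PySem.List.sorted2 xs (fun p => p.1) (fun p => p.2) false).Pairwise lexLE := by
  rw [sorted2_pairs_eq]
  have H : ∀ (xs : List (Int × Int)) (acc : List (Int × Int)), acc.Pairwise lexLE →
      (xs.foldl (fun acc x => PySem.List.insertBy bLT x acc) acc).Pairwise lexLE := by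
    intro xs
    induction xs with
    | nil => intro acc h; exact h
    | cons x t ih => intro acc h; exact ih _ (insertBy_pairwise x acc h)
  exact H xs [] List.Pairwise.nil

theorem insSorted_perm (p : Int × Int) : ∀ l : List (Int × Int),
    (ntInsSorted l p).Perm (p :: l)
  | [] => List.Perm.refl _
  | q :: rest => by
    rw [ntInsSorted]
    split
    · exact ((insSorted_perm p rest).cons q).trans (List.Perm.swap _ _ _)
    · exact List.Perm.refl _

theorem mem_insSorted {z p : Int × Int} {l : List (Int × Int)}
    (h : z ∈ ntInsSorted l p) : z = p ∨ z ∈ l := by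
  have := (insSorted_perm p l).mem_iff.mp h
  simpa using this

theorem insSorted_pairwise (p : Int × Int) : ∀ l : List (Int × Int),
    l.Pairwise lexLE → (ntInsSorted l p).Pairwise lexLE
  | [], _ => by simp [ntInsSorted, List.pairwise_cons]
  | q :: rest, hl => by
    obtain ⟨hq, hrest⟩ := List.pairwise_cons.mp hl
    rw [ntInsSorted]
    split
    · rename_i hc
      have hqp : lexLT q p := by simpa [lexLT] using hc
      refine List.pairwise_cons.mpr ⟨?_, insSorted_pairwise p rest hrest⟩
      intro z hz
      rcases mem_insSorted hz with rfl | hz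
      · exact lex_asymm hqp
      · exact hq z hz
    · rename_i hc
      have hqp : ¬ lexLT q p := by simpa [lexLT] using hc
      refine List.pairwise_cons.mpr ⟨?_, List.pairwise_cons.mpr ⟨hq, hrest⟩⟩
      intro z hz
      rcases List.mem_cons.mp hz with rfl | hz
      · exact hqp
      · intro hcon
        rcases lex_trichot q p with h1 | h1 | h1
        · exact hqp h1
        · exact (hq z hz) (h1 ▸ hcon)
        · exact (hq z hz) (lex_trans hcon h1)

theorem mem_ntL (fr : List Int) (ks : List Nat) (y : Int × Int) :
    y ∈ ntL fr ks ↔ ∃ k ∈ ks, 1 < fr.getD k 0 ∧ y = (-(fr.getD k 0), (k : Int)) := by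
  simp only [ntL, List.mem_filterMap]
  constructor
  · rintro ⟨k, hk, hy⟩
    split at hy
    · exact ⟨k, hk, by assumption, by simpa using hy.symm⟩
    · simp at hy
  · rintro ⟨k, hk, h1, rfl⟩
    exact ⟨k, hk, by rw [if_pos h1]⟩

theorem ntL_congr (fr : List Int) (k0 : Nat) (v : Int) :
    ∀ ks : List Nat, (∀ k ∈ ks, k ≠ k0) → ntL (fr.set k0 v) ks = ntL fr ks := by
  intro ks h
  unfold ntL
  refine List.filterMap_congr (fun k hk => ?_)
  rw [getD_set_ne _ _ _ _ (h k hk)]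

theorem range_split (k : Nat) (h : k < 256) :
    List.range 256 = (List.range k ++ [k]) ++ (List.range (255 - k)).map (fun t => (k + 1) + t) := by
  have h2 : 256 = (k + 1) + (255 - k) := by omega
  rw [h2, List.range_add, List.range_succ]

-- splitting ntL over range 256 at index k
theorem ntL_split (fr : List Int) (k : Nat) (h : k < 256) :
    ntL fr (List.range 256)
      = ntL fr (List.range k)
        ++ (if 1 < fr.getD k 0 then [(-(fr.getD k 0), (k : Int))] else [])
        ++ ntL fr ((List.range (255 - k)).map (fun t => (k + 1) + t)) := by
  rw [range_split k h]
  unfold ntL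
  rw [List.filterMap_append, List.filterMap_append]
  congr 2
  by_cases h1 : 1 < fr.getD k 0 <;>
    rw [List.getD_eq_getElem?_getD] at h1 <;> simp [h1]

theorem step_perm (fr : List Int) (hlen : fr.length = 256) (k : Nat) (hk : k < 256) (hf : 1 < fr.getD k 0)
    (rest : List (Int × Int))
    (hperm : ((-(fr.getD k 0), (k : Int)) :: rest).Perm (ntL fr (List.range 256))) :
    (ntL (fr.set k (fr.getD k 0 - 1)) (List.range 256)).Perm
      (if 1 < fr.getD k 0 - 1 then ntInsSorted rest (-(fr.getD k 0 - 1), (k : Int)) else rest) := by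
  have hA : ∀ k' ∈ List.range k, k' ≠ k := by intro k' hk'; have := List.mem_range.mp hk'; omega
  have hB : ∀ k' ∈ (List.range (255 - k)).map (fun t => (k + 1) + t), k' ≠ k := by
    intro k' hk'
    obtain ⟨t, _, rfl⟩ := List.mem_map.mp hk'
    omega
  have hsplit := ntL_split fr k hk
  have hsplit' := ntL_split (fr.set k (fr.getD k 0 - 1)) k hk
  rw [ntL_congr fr k _ _ hA, ntL_congr fr k _ _ hB,
      getD_set_self fr k _ (by omega)] at hsplit'
  -- rest.Perm (ntL fr (range k) ++ ntL fr (map part))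
  rw [hsplit, if_pos hf] at hperm
  have hmid : (ntL fr (List.range k) ++ [(-(fr.getD k 0), (k : Int))]
      ++ ntL fr ((List.range (255 - k)).map (fun t => (k + 1) + t))).Perm
      ((-(fr.getD k 0), (k : Int)) :: (ntL fr (List.range k)
        ++ ntL fr ((List.range (255 - k)).map (fun t => (k + 1) + t)))) := by
    rw [List.append_assoc]
    exact List.perm_middle
  have hrest : rest.Perm (ntL fr (List.range k)
      ++ ntL fr ((List.range (255 - k)).map (fun t => (k + 1) + t))) :=
    (hperm.trans hmid).cons_inv
  rw [hsplit']
  by_cases h1 : 1 < fr.getD k 0 - 1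
  · rw [if_pos h1, if_pos h1]
    refine List.Perm.trans ?_ (insSorted_perm _ rest).symm
    refine List.Perm.trans ?_ (hrest.symm.cons _)
    rw [List.append_assoc]
    exact List.perm_middle
  · rw [if_neg h1, if_neg h1]
    simpa using hrest.symm


def scanM (fr : List Int) (m : Nat) : Int × Int :=
  (PySem.List.pyRange 0 (m : Int) 1).foldl
    (fun st i =>
      let f := PySem.List.pyGetD fr i 0
      if 1 < f ∧ st.2 < f then (i, f) else st) (-1, -1)

def NtMin (L : List (Int × Int)) (z : Int × Int) : Prop := z ∈ L ∧ ∀ y ∈ L, y = z ∨ lexLT z y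

theorem ntL_snoc (fr : List Int) (m : Nat) :
    ntL fr (List.range (m+1))
      = ntL fr (List.range m) ++ (if 1 < fr.getD m 0 then [(-(fr.getD m 0), (m : Int))] else []) := by
  rw [List.range_succ]
  unfold ntL
  rw [List.filterMap_append]
  congr 1
  by_cases h1 : 1 < fr.getD m 0 <;>
    rw [List.getD_eq_getElem?_getD] at h1 <;> simp [h1]

theorem scan_spec (fr : List Int) : ∀ m : Nat,
    (scanM fr m = (-1, -1) ∧ ntL fr (List.range m) = []) ∨
    (∃ k : Nat, k < m ∧ scanM fr m = ((k : Int), fr.getD k 0) ∧ 1 < fr.getD k 0 ∧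
      NtMin (ntL fr (List.range m)) (-(fr.getD k 0), (k : Int)))
  | 0 => by
    left
    constructor
    · rw [scanM, PySem.List.pyRange_one_eq_nil (by norm_num)]
      rfl
    · rfl
  | m+1 => by
    have hstep : scanM fr (m+1)
        = (if 1 < fr.getD m 0 ∧ (scanM fr m).2 < fr.getD m 0
           then ((m : Int), fr.getD m 0) else scanM fr m) := by
      rw [scanM, scanM]
      rw [show ((m+1 : Nat) : Int) = (m : Int) + 1 by push_cast; ring]
      rw [PySem.List.pyRange_one_succ_right (by positivity), List.foldl_append, List.foldl_cons,
        List.foldl_nil]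
      simp only [PySem.List.pyGetD_natCast]
    rw [hstep, ntL_snoc fr m]
    rcases scan_spec fr m with ⟨hs, hL⟩ | ⟨k, hkm, hs, hfk, hmem, hmin⟩
    · rw [hs, hL]
      by_cases h1 : 1 < fr.getD m 0
      · right
        refine ⟨m, by omega, ?_, h1, ?_, ?_⟩
        · rw [if_pos ⟨h1, by change (-1 : Int) < _; omega⟩]
        · rw [if_pos h1]; simp
        · intro y hy
          rw [if_pos h1] at hy
          simp only [List.nil_append, List.mem_singleton] at hy
          left; exact hy
      · left
        refine ⟨?_, ?_⟩
        · rw [if_neg (by intro hc; exact h1 hc.1)]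
        · rw [if_neg h1]; rfl
    · by_cases h1 : 1 < fr.getD m 0
      · by_cases h2 : fr.getD k 0 < fr.getD m 0
        · right
          refine ⟨m, by omega, ?_, h1, ?_, ?_⟩
          · rw [hs, if_pos ⟨h1, h2⟩]
          · rw [if_pos h1]; simp
          · intro y hy
            rw [if_pos h1] at hy
            rcases List.mem_append.mp hy with hy | hy
            · right
              rcases hmin y hy with rfl | hlt
              · simp only [lexLT]; left; omega
              · rcases y with ⟨y1, y2⟩
                simp only [lexLT] at hlt ⊢
                omega
            · left; simpa using hy
        · right
          refine ⟨k, by omega, ?_, hfk, ?_, ?_⟩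
          · rw [hs, if_neg (by intro hc; exact h2 hc.2)]
          · rw [if_pos h1]; exact List.mem_append.mpr (Or.inl hmem)
          · intro y hy
            rw [if_pos h1] at hy
            rcases List.mem_append.mp hy with hy | hy
            · exact hmin y hy
            · right
              simp only [List.mem_singleton] at hy
              subst hy
              simp only [lexLT]
              have hkm' : (k : Int) < (m : Int) := by exact_mod_cast hkm
              omega
      · refine Or.inr ⟨k, by omega, ?_, hfk, ?_, ?_⟩
        · rw [hs, if_neg (by intro hc; exact h1 hc.1)]
        · rw [if_neg h1]; simpa using hmem
        · intro y hy
          rw [if_neg h1] at hy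
          exact hmin y (by simpa using hy)

theorem scan_bridge (fr : List Int) : ntBestScan fr = scanM fr 256 := by
  rw [ntBestScan, scanM]
  norm_num

theorem scan_empty (fr : List Int) (h : ntL fr (List.range 256) = []) :
    ntBestScan fr = (-1, -1) := by
  rw [scan_bridge]
  rcases scan_spec fr 256 with ⟨hs, _⟩ | ⟨k, _, _, _, hmem, _⟩
  · exact hs
  · rw [h] at hmem; simp at hmem

theorem scan_min (fr : List Int) (nv i : Int)
    (hmem : (nv, i) ∈ ntL fr (List.range 256))
    (hmin : ∀ y ∈ ntL fr (List.range 256), y = (nv, i) ∨ lexLT (nv, i) y) :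
    ntBestScan fr = (i, -nv) := by
  rw [scan_bridge]
  rcases scan_spec fr 256 with ⟨_, hL⟩ | ⟨k, _, hs, _, hmem', hmin'⟩
  · rw [hL] at hmem; simp at hmem
  · have h1 := hmin _ hmem'
    have h2 := hmin' _ hmem
    have heq : (-(fr.getD k 0), (k : Int)) = (nv, i) := by
      rcases h1 with h1 | h1
      · exact h1
      · rcases h2 with h2 | h2
        · exact h2.symm
        · exact absurd h1 (lex_asymm h2)
    have h3 : nv = -(fr.getD k 0) ∧ i = (k : Int) := by
      have := heq
      simp [Prod.ext_iff] at this
      exact ⟨this.1.symm, this.2.symm⟩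
    rw [hs, h3.1, h3.2]
    simp

theorem sub_eq : ∀ (fuel : Nat) (fr : List Int) (items : List (Int × Int)),
    fr.length = 256 → items.Perm (ntL fr (List.range 256)) → items.Pairwise lexLE →
    ntSubLoopA fr fuel = ntSubLoopB fr items fuel
  | 0, fr, items, _, _, _ => rfl
  | fuel+1, fr, [], hlen, hperm, hpw => by
    have hL : ntL fr (List.range 256) = [] := List.Perm.eq_nil hperm.symm
    rw [ntSubLoopA, ntSubLoopB]
    rw [scan_empty fr hL]
    norm_num
  | fuel+1, fr, (nv, i) :: rest, hlen, hperm, hpw => by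
    have hmem : (nv, i) ∈ ntL fr (List.range 256) :=
      hperm.mem_iff.mp (List.mem_cons_self ..)
    obtain ⟨k, hk, hfk, hy⟩ := (mem_ntL fr _ _).mp hmem
    have hk256 : k < 256 := List.mem_range.mp hk
    obtain ⟨rfl, rfl⟩ : nv = -(fr.getD k 0) ∧ i = (k : Int) := by
      simp [Prod.ext_iff] at hy; exact hy
    have hmin : ∀ y ∈ ntL fr (List.range 256), y = (-(fr.getD k 0), (k : Int)) ∨
        lexLT (-(fr.getD k 0), (k : Int)) y := by
      intro y hy'
      rcases List.mem_cons.mp (hperm.symm.mem_iff.mp hy') with rfl | hy2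
      · left; rfl
      · have hle := (List.pairwise_cons.mp hpw).1 y hy2
        rcases lex_trichot (-(fr.getD k 0), (k : Int)) y with h | h | h
        · right; exact h
        · left; exact h.symm
        · exact absurd h hle
    rw [ntSubLoopA, ntSubLoopB]
    rw [scan_min fr _ _ hmem hmin]
    rw [if_neg (by simp)]
    simp only []
    have hfr' : PySem.List.pySetD fr (k : Int) (PySem.List.pyGetD fr (k : Int) 0 - 1)
        = fr.set k (fr.getD k 0 - 1) := by
      rw [PySem.List.pyGetD_natCast, PySem.List.pySetD_natCast]
    have hfr'' : PySem.List.pySetD fr (k : Int) (- -(fr.getD k 0) - 1)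
        = fr.set k (fr.getD k 0 - 1) := by
      rw [PySem.List.pySetD_natCast]
      congr 1
      ring
    rw [hfr', hfr'']
    have hperm' := step_perm fr hlen k hk256 hfk rest hperm
    have hite : (if 1 < - -(fr.getD k 0) - 1 then
          ntInsSorted rest (-(- -(fr.getD k 0) - 1), (k : Int)) else rest)
        = (if 1 < fr.getD k 0 - 1 then ntInsSorted rest (-(fr.getD k 0 - 1), (k : Int)) else rest) := by
      norm_num
    rw [hite]
    apply sub_eq fuel
    · rw [List.length_set, hlen]
    · by_cases h1 : 1 < fr.getD k 0 - 1
      · rw [if_pos h1]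
        rw [if_pos h1] at hperm'
        exact hperm'.symm
      · rw [if_neg h1]
        rw [if_neg h1] at hperm'
        exact hperm'.symm
    · by_cases h1 : 1 < fr.getD k 0 - 1
      · rw [if_pos h1]
        exact insSorted_pairwise _ _ (List.pairwise_cons.mp hpw).2
      · rw [if_neg h1]
        exact (List.pairwise_cons.mp hpw).2

theorem items0_perm (fr : List Int) : (ntItems0 fr).Perm (ntL fr (List.range 256)) := by
  unfold ntItems0
  refine (PySem.List.sorted2_perm _ _ _ _).trans ?_
  have h256 : (PySem.List.pyRange 0 256 1) = (List.range 256).map (fun k : Nat => (k : Int)) := by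
    rw [show ((256 : Int)) = ((256 : Nat) : Int) by norm_num]
    exact PySem.List.pyRange_zero_nat 256
  rw [h256, List.filterMap_map]
  have : ∀ k ∈ List.range 256,
      ((fun i => if 1 < PySem.List.pyGetD fr i 0
          then some (-(PySem.List.pyGetD fr i 0), i) else none) ∘ (fun k : Nat => (k : Int))) k
        = (fun k : Nat => if 1 < fr.getD k 0 then some (-(fr.getD k 0), (k : Int)) else none) k := by
    intro k _
    simp [Function.comp, PySem.List.pyGetD_natCast]
  rw [List.filterMap_congr this]
  exact List.Perm.refl _

theorem items0_pairwise (fr : List Int) : (ntItems0 fr).Pairwise lexLE :=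
  sorted2_pairs_pairwise _

theorem main_eq (raw_count : List Int) (total : Int) :
    normalise_to_total raw_count total = normalise_to_total_alt raw_count total := by
  simp only [normalise_to_total, normalise_to_total_alt]
  by_cases hs : raw_count.sum = 0
  · simp only [if_pos hs]
  · simp only [if_neg hs]
    by_cases h0 : total - (ntPhase1 raw_count total raw_count.sum).2 = 0
    · simp only [if_pos h0]
    · simp only [if_neg h0]
      by_cases hpos : 0 < total - (ntPhase1 raw_count total raw_count.sum).2
      · simp only [if_pos hpos]
        by_cases hord : ntOrder raw_count (ntPhase1 raw_count total raw_count.sum).1 = []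
        · simp only [if_pos hord]
        · simp only [if_neg hord]
          exact addpos_eq _ (order_mem _ _) (order_nodup _ _) hord _ hpos _
            (phase1_len raw_count total raw_count.sum)
      · simp only [if_neg hpos]
        exact sub_eq _ _ _ (phase1_len raw_count total raw_count.sum)
          (items0_perm _) (items0_pairwise _)

-- ===== VERDICT (by name: the statement is the Claim_ definition above) =====
theorem normalise_to_total_spec : Claim_equal_normalise_to_total := by
  intro rc total _ _
  unfold Spec_normalise_to_total
  exact main_eq rc total
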